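-- pv_equiv track=rewrite | github.com/mrceresa/PyHTN | planner/examples/logic_ops.py | method_test
-- ===== SOURCE A (Python) =====
-- def method_test(world_state, input_binding):
--     def satisfy_branch_0(world_state, input_binding):
--         output_binding = input_binding.copy()
--         for b in world_state.get('apple', []):
--             output_binding['?a'] = b[0]
--             for b in world_state.get('color', []):
--                 if b[0] != output_binding['?a']:
--                     continue
--                 if b[1] == 'red':
--                     continue
--                 for b in world_state.get('color', []):
--                     if b[0] != output_binding['?a']:
--                         continue
--                     if b[1] == 'green':
--                         continue
--                     yield output_binding
--     precondition_satisfied = False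
--     for branch_satisfier in satisfy_branch_0(world_state, input_binding):
--         precondition_satisfied = True
--         t0 = [('!result', branch_satisfier['?a'])]
--         yield t0
--     yield None
-- ===== SOURCE B (Python) =====
-- def method_test(world_state, input_binding):
--     # One pass over the color facts builds per-id counts of non-red and
--     # non-green entries; each apple then yields its tuple count-product times.
--     nonred = {}
--     nongreen = {}
--     for cid, cval in world_state.get('color', []):
--         if cval != 'red':
--             nonred[cid] = nonred.get(cid, 0) + 1
--         if cval != 'green':
--             nongreen[cid] = nongreen.get(cid, 0) + 1
--     for entry in world_state.get('apple', []):
--         a = entry[0]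
--         for _ in range(nonred.get(a, 0) * nongreen.get(a, 0)):
--             yield [('!result', a)]
--     yield None
-- ===== Notes on version B (the rewrite author's own statement) =====
-- stated objective: alternative
-- what changed: Replaced A's two nested rescans of the color list per apple by a single counting pass that builds per-id non-red and non-green counters, then each apple emits its result tuple (non-red count * non-green count) times.
import Mathlib
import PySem

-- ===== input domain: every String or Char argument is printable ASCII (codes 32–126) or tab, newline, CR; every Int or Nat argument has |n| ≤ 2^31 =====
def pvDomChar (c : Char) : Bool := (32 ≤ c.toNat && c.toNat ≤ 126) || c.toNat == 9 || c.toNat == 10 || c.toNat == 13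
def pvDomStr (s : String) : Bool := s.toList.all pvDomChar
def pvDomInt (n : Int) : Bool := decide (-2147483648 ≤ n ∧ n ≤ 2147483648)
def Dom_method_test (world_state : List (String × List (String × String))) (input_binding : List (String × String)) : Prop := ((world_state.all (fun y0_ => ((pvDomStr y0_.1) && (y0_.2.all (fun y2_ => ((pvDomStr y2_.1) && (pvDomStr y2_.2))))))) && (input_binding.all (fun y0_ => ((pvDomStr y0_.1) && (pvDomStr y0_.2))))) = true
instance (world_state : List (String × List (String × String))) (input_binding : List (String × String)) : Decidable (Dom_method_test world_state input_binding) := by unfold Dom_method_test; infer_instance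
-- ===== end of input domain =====

-- B replaces A's nested per-apple rescans of the color facts by one counting
-- pass (per-id non-red / non-green counters) and emits each apple's tuple
-- count-product times; objective: alternative algorithm.

-- ===== PORT A =====
def method_test (world_state : List (String × List (String × String))) (input_binding : List (String × String)) : List (Option (List (String × String))) :=
  -- generator: collect the dicts yielded by satisfy_branch_0, then map to t0, then the final None
  let colors := (PySem.Dict.mk world_state).getD "color" []
  let gen :=
    (((PySem.Dict.mk world_state).getD "apple" []).foldl
      (fun (st : List (PySem.Dict String String) × PySem.Dict String String) b =>
        let ob := st.2.insert "?a" b.1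
        let ys := colors.foldl (fun a2 c =>
            if c.1 ≠ ob.getD "?a" "" then a2
            else if c.2 = "red" then a2
            else colors.foldl (fun a3 d =>
                if d.1 ≠ ob.getD "?a" "" then a3
                else if d.2 = "green" then a3
                else a3 ++ [ob]) a2) []
        (st.1 ++ ys, ob))
      ([], PySem.Dict.mk input_binding)).1
  gen.map (fun bs => some [("!result", bs.getD "?a" "")]) ++ [none]

-- ===== PORT B =====
def method_test_alt (world_state : List (String × List (String × String))) (input_binding : List (String × String)) : List (Option (List (String × String))) :=
  let cnts :=
    (((PySem.Dict.mk world_state).getD "color" []).foldl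
      (fun (st : PySem.Dict String Int × PySem.Dict String Int) c =>
        (if c.2 ≠ "red" then st.1.insert c.1 (st.1.getD c.1 0 + 1) else st.1,
         if c.2 ≠ "green" then st.2.insert c.1 (st.2.getD c.1 0 + 1) else st.2))
      (PySem.Dict.empty, PySem.Dict.empty))
  (((PySem.Dict.mk world_state).getD "apple" []).foldl
    (fun acc e =>
      acc ++ List.replicate ((cnts.1.getD e.1 0) * (cnts.2.getD e.1 0)).toNat
        (some [("!result", e.1)])) [])
  ++ [none]

-- ===== PRECONDITION & SPEC =====
def Spec_method_test (world_state : List (String × List (String × String))) (input_binding : List (String × String)) (out : List (Option (List (String × String)))) : Prop := out = method_test_alt world_state input_binding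
instance (world_state : List (String × List (String × String))) (input_binding : List (String × String)) (out : List (Option (List (String × String)))) : Decidable (Spec_method_test world_state input_binding out) := by unfold Spec_method_test; infer_instance

-- ===== CLAIM (what is proved, stated in full; the proofs are below) =====
def Claim_equal_method_test : Prop := ∀ (world_state : List (String × List (String × String))) (input_binding : List (String × String)), Dom_method_test world_state input_binding → Spec_method_test world_state input_binding (method_test world_state input_binding)

-- ===== LEMMAS AND PROOFS =====

/-- count of color facts for id `a` that are not red -/
def nrc (colors : List (String × String)) (a : String) : Nat :=
  colors.countP (fun c => c.1 == a && !(c.2 == "red"))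

/-- count of color facts for id `a` that are not green -/
def ngc (colors : List (String × String)) (a : String) : Nat :=
  colors.countP (fun c => c.1 == a && !(c.2 == "green"))

theorem inner_fold (x : String) (ob : PySem.Dict String String) :
    ∀ (L : List (String × String)) (acc : List (PySem.Dict String String)),
      L.foldl (fun a3 d => if d.1 ≠ x then a3 else if d.2 = "green" then a3 else a3 ++ [ob]) acc
        = acc ++ List.replicate (ngc L x) ob := by
  intro L
  induction L with
  | nil => intro acc; simp [ngc]
  | cons d L ih =>
    intro acc
    simp only [List.foldl_cons]
    by_cases h1 : d.1 = x
    · rw [if_neg (by simp [h1])]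
      by_cases h2 : d.2 = "green"
      · rw [if_pos h2, ih]
        simp [ngc, List.countP_cons, h1, h2]
      · rw [if_neg h2, ih]
        simp [ngc, List.countP_cons, h1, h2, List.replicate_succ, List.append_assoc]
    · rw [if_pos h1, ih]
      simp [ngc, List.countP_cons, h1]

theorem middle_fold (x : String) (ob : PySem.Dict String String)
    (colors : List (String × String)) :
    ∀ (L : List (String × String)) (acc : List (PySem.Dict String String)),
      L.foldl (fun a2 c =>
          if c.1 ≠ x then a2
          else if c.2 = "red" then a2
          else colors.foldl (fun a3 d =>
              if d.1 ≠ x then a3 else if d.2 = "green" then a3 else a3 ++ [ob]) a2) acc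
        = acc ++ List.replicate (nrc L x * ngc colors x) ob := by
  intro L
  induction L with
  | nil => intro acc; simp [nrc]
  | cons c L ih =>
    intro acc
    simp only [List.foldl_cons]
    by_cases h1 : c.1 = x
    · rw [if_neg (by simp [h1])]
      by_cases h2 : c.2 = "red"
      · rw [if_pos h2, ih]
        simp [nrc, List.countP_cons, h1, h2]
      · rw [if_neg h2, inner_fold x ob colors acc, ih]
        rw [List.append_assoc, ← List.replicate_add]
        have h3 : ngc colors x + nrc L x * ngc colors x = nrc (c :: L) x * ngc colors x := by
          simp [nrc, List.countP_cons, h1, h2]; ring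
        rw [h3]
    · rw [if_pos h1, ih]
      simp [nrc, List.countP_cons, h1]

theorem outer_fold (colors : List (String × String)) :
    ∀ (apples : List (String × String)) (acc : List (PySem.Dict String String))
      (ob0 : PySem.Dict String String),
      ((apples.foldl
        (fun (st : List (PySem.Dict String String) × PySem.Dict String String) b =>
          let ob := st.2.insert "?a" b.1
          let ys := colors.foldl (fun a2 c =>
              if c.1 ≠ ob.getD "?a" "" then a2
              else if c.2 = "red" then a2
              else colors.foldl (fun a3 d =>
                  if d.1 ≠ ob.getD "?a" "" then a3
                  else if d.2 = "green" then a3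
                  else a3 ++ [ob]) a2) []
          (st.1 ++ ys, ob))
        (acc, ob0)).1).map (fun bs => some [("!result", bs.getD "?a" "")])
      = acc.map (fun bs => some [("!result", bs.getD "?a" "")])
        ++ apples.flatMap (fun b =>
            List.replicate (nrc colors b.1 * ngc colors b.1)
              (some [("!result", b.1)])) := by
  intro apples
  induction apples with
  | nil => intro acc ob0; simp
  | cons b apples ih =>
    intro acc ob0
    simp only [List.foldl_cons, List.flatMap_cons]
    rw [ih]
    have hget : (ob0.insert "?a" b.1).getD "?a" "" = b.1 := PySem.Dict.getD_insert_self _ _ _ _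
    simp only [hget, middle_fold b.1 (ob0.insert "?a" b.1) colors colors, List.nil_append]
    simp [hget, List.map_replicate]

theorem counts_fold :
    ∀ (L : List (String × String)) (d1 d2 : PySem.Dict String Int) (a : String),
      ((L.foldl
        (fun (st : PySem.Dict String Int × PySem.Dict String Int) c =>
          (if c.2 ≠ "red" then st.1.insert c.1 (st.1.getD c.1 0 + 1) else st.1,
           if c.2 ≠ "green" then st.2.insert c.1 (st.2.getD c.1 0 + 1) else st.2))
        (d1, d2)).1.getD a 0 = d1.getD a 0 + (nrc L a : Int))
      ∧ ((L.foldl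
        (fun (st : PySem.Dict String Int × PySem.Dict String Int) c =>
          (if c.2 ≠ "red" then st.1.insert c.1 (st.1.getD c.1 0 + 1) else st.1,
           if c.2 ≠ "green" then st.2.insert c.1 (st.2.getD c.1 0 + 1) else st.2))
        (d1, d2)).2.getD a 0 = d2.getD a 0 + (ngc L a : Int)) := by
  intro L
  induction L with
  | nil => intro d1 d2 a; simp [nrc, ngc]
  | cons c L ih =>
    intro d1 d2 a
    simp only [List.foldl_cons]
    obtain ⟨ih1, ih2⟩ := ih (if c.2 ≠ "red" then d1.insert c.1 (d1.getD c.1 0 + 1) else d1)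
      (if c.2 ≠ "green" then d2.insert c.1 (d2.getD c.1 0 + 1) else d2) a
    constructor
    · rw [ih1]
      by_cases h2 : c.2 = "red"
      · simp [nrc, List.countP_cons, h2]
      · rw [if_pos h2, PySem.Dict.getD_insert]
        by_cases h1 : c.1 = a
        · rw [if_pos h1.symm, h1]
          simp [nrc, List.countP_cons, h2]
          rw [if_pos h1]; ring
        · rw [if_neg (fun h => h1 h.symm)]
          simp [nrc, List.countP_cons, h1]
    · rw [ih2]
      by_cases h2 : c.2 = "green"
      · simp [ngc, List.countP_cons, h2]
      · rw [if_pos h2, PySem.Dict.getD_insert]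
        by_cases h1 : c.1 = a
        · rw [if_pos h1.symm, h1]
          simp [ngc, List.countP_cons, h2]
          rw [if_pos h1]; ring
        · rw [if_neg (fun h => h1 h.symm)]
          simp [ngc, List.countP_cons, h1]

theorem alt_eq (world_state : List (String × List (String × String)))
    (input_binding : List (String × String)) :
    method_test_alt world_state input_binding
      = (((PySem.Dict.mk world_state).getD "apple" []).flatMap (fun b =>
          List.replicate
            (nrc ((PySem.Dict.mk world_state).getD "color" []) b.1
              * ngc ((PySem.Dict.mk world_state).getD "color" []) b.1)
            (some [("!result", b.1)]))) ++ [none] := by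
  simp only [method_test_alt]
  rw [PySem.List.foldl_append_eq_flatMap]
  congr 1
  simp only [List.nil_append]
  congr 1
  funext e
  obtain ⟨h1, h2⟩ := counts_fold ((PySem.Dict.mk world_state).getD "color" [])
    PySem.Dict.empty PySem.Dict.empty e.1
  rw [h1, h2]
  simp only [PySem.Dict.getD_empty, zero_add]
  rw [← Nat.cast_mul, Int.toNat_natCast]

-- ===== VERDICT (by name: the statement is the Claim_ definition above) =====
theorem method_test_spec : Claim_equal_method_test := by
  intro ws ib _
  unfold Spec_method_test method_test
  rw [alt_eq]
  have h := outer_fold ((PySem.Dict.mk ws).getD "color" [])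
    ((PySem.Dict.mk ws).getD "apple" []) [] (PySem.Dict.mk ib)
  rw [List.map_nil, List.nil_append] at h
  exact congrArg (fun l => l ++ [none]) h
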